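-- pv_equiv track=rewrite | github.com/mlobel/Python2 | Section 2/vowel_count.py | vowel_count
-- ===== SOURCE A (Python) =====
-- def vowel_count(phrase):
--     vowels = 'aeiou'
--     phrase = phrase.lower()
--     return {vowel: phrase.count(vowel) for vowel in vowels if vowel in phrase}
--     """Return frequency map of vowels, case-insensitive.
--
--         >>> vowel_count('rithm school')
--         {'i': 1, 'o': 2}
--
--         >>> vowel_count('HOW ARE YOU? i am great!')
--         {'o': 2, 'a': 3, 'e': 2, 'u': 1, 'i': 1}
--     """
-- ===== SOURCE B (Python) =====
-- def vowel_count(phrase):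
--     na = ne = ni = no = nu = 0
--     for ch in phrase.lower():
--         if ch == 'a':
--             na += 1
--         elif ch == 'e':
--             ne += 1
--         elif ch == 'i':
--             ni += 1
--         elif ch == 'o':
--             no += 1
--         elif ch == 'u':
--             nu += 1
--     return {v: c for v, c in zip('aeiou', (na, ne, ni, no, nu)) if c}
-- ===== Notes on version B (the rewrite author's own statement) =====
-- stated objective: alternative
-- what changed: B abandons A's per-vowel phrase.count scans and its dict machinery entirely: one pass over the lowered phrase updates five scalar counters via an if/elif chain, and the result is assembled by zipping the vowel string with the counter tuple, keeping only nonzero counts (presence test replaced by count truthiness).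
import Mathlib
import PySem

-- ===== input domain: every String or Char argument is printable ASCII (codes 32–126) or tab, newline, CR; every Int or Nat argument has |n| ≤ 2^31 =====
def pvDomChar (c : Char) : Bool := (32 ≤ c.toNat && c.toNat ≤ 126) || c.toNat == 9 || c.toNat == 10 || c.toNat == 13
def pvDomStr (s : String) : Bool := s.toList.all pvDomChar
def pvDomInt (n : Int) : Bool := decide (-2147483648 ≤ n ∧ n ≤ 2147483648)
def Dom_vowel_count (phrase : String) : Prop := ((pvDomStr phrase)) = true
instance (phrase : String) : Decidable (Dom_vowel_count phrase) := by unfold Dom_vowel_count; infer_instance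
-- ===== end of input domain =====

-- B replaces A's five phrase.count scans and membership tests by one pass with five scalar counters,
-- then zips the vowel string with the counters, keeping nonzero entries (alternative decomposition, no dict tally).

-- ===== PORT A =====
-- {vowel: phrase.count(vowel) for vowel in vowels if vowel in phrase}  as a fold building a dict
def vowel_count (phrase : String) : List (String × Int) :=
  let vowels : String := "aeiou"
  let phrase := PySem.Str.lower phrase
  (vowels.toList.foldl
    (fun (d : PySem.Dict String Int) v =>
      if PySem.Str.isIn (String.ofList [v]) phrase then
        d.insert (String.ofList [v]) (PySem.Str.count phrase (String.ofList [v]) : Int)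
      else d)
    PySem.Dict.empty).items

-- ===== PORT B =====
-- single pass with five scalar counters (the if/elif chain), then zip the vowel string with the tuple,
-- building the result dict only from pairs with a nonzero (truthy) count
def vowel_count_alt (phrase : String) : List (String × Int) :=
  let t : Int × Int × Int × Int × Int :=
    (PySem.Str.lower phrase).toList.foldl
      (fun (s : Int × Int × Int × Int × Int) ch =>
        if ch = 'a' then (s.1 + 1, s.2.1, s.2.2.1, s.2.2.2.1, s.2.2.2.2)
        else if ch = 'e' then (s.1, s.2.1 + 1, s.2.2.1, s.2.2.2.1, s.2.2.2.2)
        else if ch = 'i' then (s.1, s.2.1, s.2.2.1 + 1, s.2.2.2.1, s.2.2.2.2)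
        else if ch = 'o' then (s.1, s.2.1, s.2.2.1, s.2.2.2.1 + 1, s.2.2.2.2)
        else if ch = 'u' then (s.1, s.2.1, s.2.2.1, s.2.2.2.1, s.2.2.2.2 + 1)
        else s)
      (0, 0, 0, 0, 0)
  let pairs := List.zip "aeiou".toList [t.1, t.2.1, t.2.2.1, t.2.2.2.1, t.2.2.2.2]
  (pairs.foldl
    (fun (d : PySem.Dict String Int) vc =>
      if vc.2 ≠ 0 then d.insert (String.ofList [vc.1]) vc.2 else d)
    PySem.Dict.empty).items

-- ===== PRECONDITION & SPEC =====
def Spec_vowel_count (phrase : String) (out : List (String × Int)) : Prop := out = vowel_count_alt phrase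
instance (phrase : String) (out : List (String × Int)) : Decidable (Spec_vowel_count phrase out) := by unfold Spec_vowel_count; infer_instance

-- ===== CLAIM (what is proved, stated in full; the proofs are below) =====
def Claim_equal_vowel_count : Prop := ∀ (phrase : String), Dom_vowel_count phrase → Spec_vowel_count phrase (vowel_count phrase)

-- ===== LEMMAS AND PROOFS =====

-- 'c in s' for a single character is ordinary list membership
theorem singleton_infix_iff_mem (c : Char) (l : List Char) : [c] <:+: l ↔ c ∈ l := by
  constructor
  · intro h; exact List.singleton_sublist.mp h.sublist
  · intro h
    obtain ⟨s, t, rfl⟩ := List.append_of_mem h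
    exact ⟨s, t, by simp⟩

theorem isIn_singleton_iff (c : Char) (s : String) :
    PySem.Str.isIn (String.ofList [c]) s = true ↔ c ∈ s.toList := by
  rw [PySem.Str.isIn_iff_infix, String.toList_ofList]
  exact singleton_infix_iff_mem c s.toList

-- Python's str.count for a single-character needle is list count
theorem count_go_singleton (c : Char) (l : List Char) (fuel acc : Nat) (h : l.length ≤ fuel) :
    PySem.Chars.count.go [c] fuel l acc = acc + l.count c := by
  induction l generalizing fuel acc with
  | nil => cases fuel <;> simp [PySem.Chars.count.go]
  | cons x t ih =>
    cases fuel with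
    | zero => simp at h
    | succ f =>
      simp only [List.length_cons, Nat.succ_le_succ_iff] at h
      by_cases hx : x = c
      · subst hx
        simp [PySem.Chars.count.go, List.isPrefixOf, ih f (acc + 1) h]
        omega
      · simp [PySem.Chars.count.go, List.isPrefixOf, hx, Ne.symm hx,
          ih f acc h]

theorem count_singleton (l : List Char) (c : Char) :
    PySem.Chars.count l [c] = l.count c := by
  simp [PySem.Chars.count, count_go_singleton c l l.length 0 le_rfl]

-- the five-counter pass computes the five vowel counts
theorem tally_eq (l : List Char) (a e i o u : Int) :
    l.foldl
      (fun (s : Int × Int × Int × Int × Int) ch =>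
        if ch = 'a' then (s.1 + 1, s.2.1, s.2.2.1, s.2.2.2.1, s.2.2.2.2)
        else if ch = 'e' then (s.1, s.2.1 + 1, s.2.2.1, s.2.2.2.1, s.2.2.2.2)
        else if ch = 'i' then (s.1, s.2.1, s.2.2.1 + 1, s.2.2.2.1, s.2.2.2.2)
        else if ch = 'o' then (s.1, s.2.1, s.2.2.1, s.2.2.2.1 + 1, s.2.2.2.2)
        else if ch = 'u' then (s.1, s.2.1, s.2.2.1, s.2.2.2.1, s.2.2.2.2 + 1)
        else s)
      (a, e, i, o, u)
    = (a + l.count 'a', e + l.count 'e', i + l.count 'i', o + l.count 'o', u + l.count 'u') := by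
  induction l generalizing a e i o u with
  | nil => simp
  | cons x t ih =>
    simp only [List.foldl_cons, List.count_cons]
    by_cases hxa : x = 'a'
    · subst hxa; simp [ih]; omega
    · by_cases hxe : x = 'e'
      · subst hxe; simp [ih]; omega
      · by_cases hxi : x = 'i'
        · subst hxi; simp [hxa, ih]; omega
        · by_cases hxo : x = 'o'
          · subst hxo; simp [hxa, hxe, ih]; omega
          · by_cases hxu : x = 'u'
            · subst hxu; simp [hxa, hxe, hxi, ih]; omega
            · simp [hxa, hxe, hxi, hxo, hxu, ih]

-- one dict-building step of A equals one of B, for a fixed vowel v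
theorem step_eq (l : List Char) (v : Char) (d : PySem.Dict String Int) :
    (if PySem.Str.isIn (String.ofList [v]) (String.ofList l) then
        d.insert (String.ofList [v]) (PySem.Str.count (String.ofList l) (String.ofList [v]) : Int)
      else d)
    = (if ((l.count v : Int) ≠ 0) then d.insert (String.ofList [v]) (l.count v : Int) else d) := by
  by_cases hv : v ∈ l
  · have h1 : PySem.Str.isIn (String.ofList [v]) (String.ofList l) = true := by
      rw [isIn_singleton_iff, String.toList_ofList]; exact hv
    have h2 : (l.count v : Int) ≠ 0 := by
      have := List.count_pos_iff.mpr hv; omega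
    rw [if_pos h1, if_pos h2, PySem.Str.count_eq]
    simp [count_singleton]
  · have h1 : PySem.Str.isIn (String.ofList [v]) (String.ofList l) = false := by
      rw [Bool.eq_false_iff, Ne, isIn_singleton_iff, String.toList_ofList]; exact hv
    have h2 : ¬ ((l.count v : Int) ≠ 0) := by
      simp [List.count_eq_zero_of_not_mem hv]
    have h1' : PySem.Chars.isIn [v] l = false := by simpa using h1
    rw [if_neg (by simp [h1']), if_neg h2]

-- ===== VERDICT (by name: the statement is the Claim_ definition above) =====
theorem vowel_count_spec : Claim_equal_vowel_count := by
  intro phrase _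
  unfold Spec_vowel_count vowel_count vowel_count_alt
  set l := (PySem.Str.lower phrase).toList with hl
  have hstr : PySem.Str.lower phrase = String.ofList l := by
    rw [hl, String.ofList_toList]
  have haeiou : "aeiou".toList = ['a','e','i','o','u'] := by decide
  rw [hstr]
  simp only [tally_eq, zero_add, haeiou, List.zip, List.zipWith, List.foldl_cons,
    List.foldl_nil]
  rw [step_eq l 'a', step_eq l 'e', step_eq l 'i', step_eq l 'o', step_eq l 'u']
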